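-- pv_equiv track=rewrite | github.com/www6v/pyExamples | algo/other/object.py | merge_every_three_objects_to_one
-- ===== SOURCE A (Python) =====
-- def merge_every_three_objects_to_one(input_list):
--     result = []
--     for i in range(0, len(input_list), 3):
--         # 取当前三个元素
--         group = input_list[i:i+3]
--         # 合并为一个新对象（这里以字典为例）
--         merged = {}
--         for obj in group:
--             merged.update(obj)
--         result.append(merged)
--     return result
-- ===== SOURCE B (Python) =====
-- def merge_every_three_objects_to_one(input_list):
--     result = []
--     for i, obj in enumerate(input_list):
--         if i % 3 == 0:
--             result.append({})
--         result[-1].update(obj)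
--     return result
-- ===== Notes on version B (the rewrite author's own statement) =====
-- stated objective: simpler
-- what changed: Replaced the range(0,len,3)+slice outer loop with nested merge loop by a single flat pass over enumerate(input_list) that opens a fresh dict every third element and updates the last dict in place.
import Mathlib
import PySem

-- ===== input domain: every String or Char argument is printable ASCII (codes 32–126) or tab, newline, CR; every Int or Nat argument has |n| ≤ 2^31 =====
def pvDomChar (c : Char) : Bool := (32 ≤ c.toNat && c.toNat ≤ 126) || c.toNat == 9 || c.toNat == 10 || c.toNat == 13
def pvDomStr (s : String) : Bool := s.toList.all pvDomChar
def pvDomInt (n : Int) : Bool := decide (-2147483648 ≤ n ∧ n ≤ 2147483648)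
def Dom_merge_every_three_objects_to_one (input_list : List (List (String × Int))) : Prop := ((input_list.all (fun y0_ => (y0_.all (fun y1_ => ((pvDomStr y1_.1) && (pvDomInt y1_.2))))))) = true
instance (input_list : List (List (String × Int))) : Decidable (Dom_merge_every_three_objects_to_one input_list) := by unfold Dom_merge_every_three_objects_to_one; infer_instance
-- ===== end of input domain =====

-- B replaces A's range(0,len,3)/slice/inner-merge-loop with one flat pass over enumerate,
-- opening a fresh dict every third element and updating the last one — simpler, same cost.

-- ===== PORT A =====
-- merged = {}; for obj in group: merged.update(obj)
def pvAMerge (group : List (List (String × Int))) : PySem.Dict String Int :=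
  group.foldl (fun merged obj => merged.update obj) PySem.Dict.empty

-- for i in range(0, len(input_list), 3): ... — transcribed as the while-loop 'while i < len: body; i += 3'
def pvALoop (input_list : List (List (String × Int))) (i : Nat)
    (result : List (List (String × Int))) : List (List (String × Int)) :=
  if i < input_list.length then
    pvALoop input_list (i + 3)
      (result ++ [(pvAMerge (PySem.List.slice input_list (some (i : Int)) (some ((i : Int) + 3)))).items])
  else result
termination_by input_list.length - i

def merge_every_three_objects_to_one (input_list : List (List (String × Int))) :
    List (List (String × Int)) :=
  pvALoop input_list 0 []

-- ===== PORT B =====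
-- one step of the flat pass: if i % 3 == 0: result.append({}); result[-1].update(obj)
-- (result is kept reversed, so result[-1] is the head; the [] branch is unreachable: index 0 opens a dict)
def pvBStep (acc : List (PySem.Dict String Int)) (p : Int × List (String × Int)) :
    List (PySem.Dict String Int) :=
  let acc := if p.1 % 3 == 0 then PySem.Dict.empty :: acc else acc
  match acc with
  | [] => []
  | d :: rest => d.update p.2 :: rest

def merge_every_three_objects_to_one_alt (input_list : List (List (String × Int))) :
    List (List (String × Int)) :=
  (((PySem.List.enumerate input_list 0).foldl pvBStep []).reverse).map (fun d => d.items)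

-- ===== PRECONDITION & SPEC =====
def Spec_merge_every_three_objects_to_one (input_list : List (List (String × Int))) (out : List (List (String × Int))) : Prop := out = merge_every_three_objects_to_one_alt input_list
instance (input_list : List (List (String × Int))) (out : List (List (String × Int))) : Decidable (Spec_merge_every_three_objects_to_one input_list out) := by unfold Spec_merge_every_three_objects_to_one; infer_instance

-- ===== CLAIM (what is proved, stated in full; the proofs are below) =====
def Claim_equal_merge_every_three_objects_to_one : Prop := ∀ (input_list : List (List (String × Int))), Dom_merge_every_three_objects_to_one input_list → Spec_merge_every_three_objects_to_one input_list (merge_every_three_objects_to_one input_list)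

-- ===== LEMMAS AND PROOFS =====

-- the common shape both loops compute: merge the first three, recurse on the rest
def pvChunks : List (List (String × Int)) → List (PySem.Dict String Int)
  | [] => []
  | x :: xs => pvAMerge (x :: xs.take 2) :: pvChunks (xs.drop 2)
termination_by l => l.length
decreasing_by simp

theorem pvSlice_take (l : List (List (String × Int))) (i : Nat) :
    PySem.List.slice l (some (i : Int)) (some ((i : Int) + 3)) = (l.drop i).take 3 := by
  have h3 : ((i : Int) + 3) = (i : Int) + ((3 : Nat) : Int) := by norm_num
  rw [h3, PySem.List.slice_natCast_add]

theorem pvALoop_eq (l : List (List (String × Int))) (i : Nat)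
    (res : List (List (String × Int))) :
    pvALoop l i res = res ++ (pvChunks (l.drop i)).map (fun d => d.items) := by
  rw [pvALoop]
  split
  · next h =>
    rw [pvALoop_eq l (i + 3)]
    have hne : l.drop i ≠ [] := by
      intro he
      rw [List.drop_eq_nil_iff] at he
      omega
    obtain ⟨x, xs, hx⟩ := List.exists_cons_of_ne_nil hne
    have hdrop : l.drop (i + 3) = xs.drop 2 := by
      have : l.drop (i + 3) = (l.drop i).drop 3 := by
        rw [List.drop_drop]
      rw [this, hx]
      simp
    rw [pvSlice_take, hx, hdrop]
    simp [pvChunks]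
  · next h =>
    have : l.drop i = [] := by
      apply List.drop_eq_nil_of_le
      omega
    simp [this, pvChunks]
termination_by l.length - i

theorem pvBFold_eq (l : List (List (String × Int))) (s : Int) (hs : s % 3 = 0)
    (acc : List (PySem.Dict String Int)) :
    (PySem.List.enumerate l s).foldl pvBStep acc = (pvChunks l).reverse ++ acc := by
  match l with
  | [] => simp [PySem.List.enumerate_nil, pvChunks]
  | [x] =>
    simp [PySem.List.enumerate_cons, PySem.List.enumerate_nil, pvChunks, pvBStep, hs, pvAMerge]
  | [x, y] =>
    have h1 : ((s + 1) % 3 == 0) = false := by simp; omega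
    simp [PySem.List.enumerate_cons, PySem.List.enumerate_nil, pvChunks, pvBStep, hs, h1, pvAMerge]
  | x :: y :: z :: rest =>
    have h1 : ((s + 1) % 3 == 0) = false := by simp; omega
    have h2 : ((s + 1 + 1) % 3 == 0) = false := by simp; omega
    have h3 : (s + 1 + 1 + 1) % 3 = 0 := by omega
    rw [PySem.List.enumerate_cons, PySem.List.enumerate_cons, PySem.List.enumerate_cons]
    simp only [List.foldl_cons]
    rw [show pvBStep acc (s, x) = (PySem.Dict.empty.update x) :: acc by simp [pvBStep, hs]]
    rw [show pvBStep ((PySem.Dict.empty.update x) :: acc) (s + 1, y)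
          = ((PySem.Dict.empty.update x).update y) :: acc by simp [pvBStep, h1]]
    rw [show pvBStep (((PySem.Dict.empty.update x).update y) :: acc) (s + 1 + 1, z)
          = (((PySem.Dict.empty.update x).update y).update z) :: acc by simp [pvBStep, h2]]
    rw [pvBFold_eq rest (s + 1 + 1 + 1) h3]
    simp [pvChunks, pvAMerge]
termination_by l.length

-- ===== VERDICT (by name: the statement is the Claim_ definition above) =====
theorem merge_every_three_objects_to_one_spec : Claim_equal_merge_every_three_objects_to_one := by
  intro input_list _
  unfold Spec_merge_every_three_objects_to_one
  unfold merge_every_three_objects_to_one merge_every_three_objects_to_one_alt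
  rw [pvALoop_eq, pvBFold_eq input_list 0 (by norm_num)]
  simp
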